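-- pv_equiv track=rewrite | github.com/hkexgroup/resipy | src/resipy/seqGen.py | checkCmdSep
-- ===== SOURCE A (Python) =====
-- def checkCmdSep(lines, limit=None):
--     # limit is needed for efficiency
--     ncmdline = len(lines)
--     if limit is None:
--         limit = ncmdline + 1
--     cmdsep = [ncmdline]*ncmdline
--     for i in range(ncmdline):
--         cline = lines[i]
--         c1 = cline[0]
--         c2 = cline[1]
--         # loop through and grab next line
--         count = 0
--         for j in range(i, ncmdline):
--             if j <= i:
--                 continue
--             nline = lines[j]
--             pn = nline[2:]
--             if c1 in pn or c2 in pn: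
--                 cmdsep[i] = (j - i)
--                 break
--             count += 1
--             # use counter to make the function more efficient in loops
--             # as we're only looking for minimum seperations
--             if count > limit:
--                 break
--     return cmdsep
-- ===== SOURCE B (Python) =====
-- def checkCmdSep(lines, limit=None):
--     # Single backward pass with a value->nearest-later-index dict instead of A's
--     # quadratic forward rescans; return value identical on lists whose rows have >= 2 entries.
--     n = len(lines)
--     if limit is None:
--         limit = n + 1
--     window = limit if limit > 0 else 0
--     out = [n] * n
--     nearest = {}  # value -> smallest index j > current i with value in lines[j][2:]
--     for i in range(n - 1, -1, -1):
--         cline = lines[i]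
--         c1 = cline[0]
--         c2 = cline[1]
--         j1 = nearest.get(c1)
--         j2 = nearest.get(c2)
--         j = j1
--         if j is None or (j2 is not None and j2 < j):
--             j = j2
--         if j is not None and j - i - 1 <= window:
--             out[i] = j - i
--         for v in cline[2:]:
--             nearest[v] = i
--     return out
-- ===== Notes on version B (the rewrite author's own statement) =====
-- stated objective: faster
-- what changed: Replaces A's per-line forward rescan with one backward pass that maintains a dict from electrode value to its nearest later line index, so each line's answer is two dict lookups plus the window test.
import Mathlib
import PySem

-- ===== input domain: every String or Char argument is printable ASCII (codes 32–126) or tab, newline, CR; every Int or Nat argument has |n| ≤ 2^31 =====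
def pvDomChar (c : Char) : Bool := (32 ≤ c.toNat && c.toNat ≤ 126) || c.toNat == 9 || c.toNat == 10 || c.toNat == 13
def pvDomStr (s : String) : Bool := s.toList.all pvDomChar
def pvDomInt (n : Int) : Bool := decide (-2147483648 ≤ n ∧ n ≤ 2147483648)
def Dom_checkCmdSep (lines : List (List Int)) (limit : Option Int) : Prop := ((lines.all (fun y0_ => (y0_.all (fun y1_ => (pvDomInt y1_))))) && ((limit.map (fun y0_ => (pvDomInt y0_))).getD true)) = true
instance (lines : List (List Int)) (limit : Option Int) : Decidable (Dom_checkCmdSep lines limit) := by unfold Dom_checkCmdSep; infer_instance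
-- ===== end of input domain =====

-- B replaces A's quadratic forward rescans by one backward pass keeping a dict
-- value → nearest later line index (objective: faster; the ports agree on all
-- inputs whose rows have at least two entries — elsewhere the Python A raises).

-- ===== PORT A =====
-- inner 'for j in range(i, ncmdline)' loop of A, with its count/limit break
def csLoop (lines : List (List Int)) (i lim c1 c2 count : Int) : List Int → Option Int
  | [] => none
  | j :: js =>
    if j ≤ i then csLoop lines i lim c1 c2 count js
    else
      let nline := (PySem.List.pyGet? lines j).getD []
      let pn := PySem.List.slice nline (some 2) none
      if pn.contains c1 || pn.contains c2 then some (j - i)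
      else if count + 1 > lim then none
      else csLoop lines i lim c1 c2 (count + 1) js

def checkCmdSep (lines : List (List Int)) (limit : Option Int) : List Int :=
  let ncmdline : Int := lines.length
  let lim : Int := match limit with | none => ncmdline + 1 | some l => l
  (PySem.List.pyRange 0 ncmdline 1).map (fun i =>
    let cline := (PySem.List.pyGet? lines i).getD []
    let c1 := (PySem.List.pyGet? cline 0).getD 0
    let c2 := (PySem.List.pyGet? cline 1).getD 0
    match csLoop lines i lim c1 c2 0 (PySem.List.pyRange i ncmdline 1) with
    | some v => v
    | none => ncmdline)

-- ===== PORT B =====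
-- backward pass of Source B: walks the suffix, returns (nearest dict, out-suffix)
def altGo (window n : Int) : Int → List (List Int) → (PySem.Dict Int Int) × List Int
  | _, [] => (PySem.Dict.empty, [])
  | i, cline :: rest =>
    let p := altGo window n (i + 1) rest
    let nearest := p.1
    let c1 := (PySem.List.pyGet? cline 0).getD 0
    let c2 := (PySem.List.pyGet? cline 1).getD 0
    let j1 := nearest.get? c1
    let j2 := nearest.get? c2
    let j : Option Int :=
      match j1, j2 with
      | none, o => o
      | some a, none => some a
      | some a, some b => some (if b < a then b else a)
    let o : Int :=
      match j with
      | some jv => if jv - i - 1 ≤ window then jv - i else n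
      | none => n
    let nearest' := (PySem.List.slice cline (some 2) none).foldl (fun d v => d.insert v i) nearest
    (nearest', o :: p.2)

def checkCmdSep_alt (lines : List (List Int)) (limit : Option Int) : List Int :=
  let n : Int := lines.length
  let lim : Int := match limit with | none => n + 1 | some l => l
  let window : Int := if lim > 0 then lim else 0
  (altGo window n 0 lines).2

-- ===== PRECONDITION & SPEC =====
-- Pre_ excludes exactly the inputs where the Python A raises IndexError: a row
-- with fewer than two entries (cline[0]/cline[1]).
def Pre_checkCmdSep (lines : List (List Int)) (limit : Option Int) : Prop :=
  ∀ l ∈ lines, 2 ≤ l.length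

instance (lines : List (List Int)) (limit : Option Int) : Decidable (Pre_checkCmdSep lines limit) := by
  unfold Pre_checkCmdSep; infer_instance

def pvWitness_checkCmdSep : List (List Int) × Option Int := ([[1, 2, 5], [0, 3, 1], [9, 9, 2]], some 4)

def Spec_checkCmdSep (lines : List (List Int)) (limit : Option Int) (out : List Int) : Prop := out = checkCmdSep_alt lines limit
instance (lines : List (List Int)) (limit : Option Int) (out : List Int) : Decidable (Spec_checkCmdSep lines limit out) := by unfold Spec_checkCmdSep; infer_instance

-- ===== CLAIM (what is proved, stated in full; the proofs are below) =====
def Claim_equal_checkCmdSep : Prop := ∀ (lines : List (List Int)) (limit : Option Int), Dom_checkCmdSep lines limit → Pre_checkCmdSep lines limit → Spec_checkCmdSep lines limit (checkCmdSep lines limit)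

-- ===== LEMMAS AND PROOFS =====

-- first index ≥ k (within the suffix) whose tail-slice contains v
def occ1 (v : Int) : Int → List (List Int) → Option Int
  | _, [] => none
  | k, l :: ls => if (PySem.List.slice l (some 2) none).contains v then some k else occ1 v (k + 1) ls

-- first index ≥ k whose tail-slice contains c1 or c2
def occ (c1 c2 : Int) : Int → List (List Int) → Option Int
  | _, [] => none
  | k, l :: ls =>
      if (PySem.List.slice l (some 2) none).contains c1 || (PySem.List.slice l (some 2) none).contains c2
      then some k else occ c1 c2 (k + 1) ls

theorem occ1_ge (v : Int) : ∀ (ls : List (List Int)) (k j : Int), occ1 v k ls = some j → k ≤ j := by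
  intro ls
  induction ls with
  | nil => intro k j h; simp [occ1] at h
  | cons l ls ih =>
    intro k j h
    simp only [occ1] at h
    split at h
    · simp only [Option.some.injEq] at h; omega
    · have := ih (k + 1) j h; omega

theorem occ_ge (c1 c2 : Int) : ∀ (ls : List (List Int)) (k j : Int), occ c1 c2 k ls = some j → k ≤ j := by
  intro ls
  induction ls with
  | nil => intro k j h; simp [occ] at h
  | cons l ls ih =>
    intro k j h
    simp only [occ] at h
    split at h
    · simp_all
    · have := ih (k + 1) j h; omega

theorem occ_eq_min (c1 c2 : Int) : ∀ (ls : List (List Int)) (k : Int),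
    occ c1 c2 k ls =
      (match occ1 c1 k ls, occ1 c2 k ls with
       | none, o => o
       | some a, none => some a
       | some a, some b => some (if b < a then b else a)) := by
  intro ls
  induction ls with
  | nil => intro k; simp [occ, occ1]
  | cons l ls ih =>
    intro k
    simp only [occ, occ1]
    by_cases h1 : c1 ∈ PySem.List.slice l (some 2) none <;>
      by_cases h2 : c2 ∈ PySem.List.slice l (some 2) none
    · simp [h1, h2]
    · simp only [h1, h2, List.contains_eq_mem, decide_true, decide_false,
        Bool.or_false, if_true]
      cases ho : occ1 c2 (k + 1) ls with
      | none => simp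
      | some b =>
        have hb := occ1_ge c2 ls (k + 1) b ho
        have hnb : ¬ b < k := by omega
        simp [hnb]
    · simp only [h1, h2, List.contains_eq_mem, decide_true, decide_false,
        Bool.or_true, if_true]
      cases ho : occ1 c1 (k + 1) ls with
      | none => simp
      | some a =>
        have ha := occ1_ge c1 ls (k + 1) a ho
        have hka : k < a := by omega
        simp [hka]
    · simp only [h1, h2, List.contains_eq_mem, decide_false, Bool.or_self]
      exact ih (k + 1)

-- A's per-index value, phrased through occ
def specAt (lines : List (List Int)) (lim i : Int) : Int :=
  let cline := (PySem.List.pyGet? lines i).getD []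
  let c1 := (PySem.List.pyGet? cline 0).getD 0
  let c2 := (PySem.List.pyGet? cline 1).getD 0
  match occ c1 c2 (i + 1) (lines.drop (i + 1).toNat) with
  | some j => if j = i + 1 ∨ j - i - 1 ≤ lim then j - i else (lines.length : Int)
  | none => (lines.length : Int)

theorem csLoop_eq (lines : List (List Int)) (i lim c1 c2 : Int) :
    ∀ (suf : List (List Int)) (k : Int), 0 ≤ k → k ≤ (lines.length : Int) →
      suf = lines.drop k.toNat → i < k → (k = i + 1 ∨ k - i - 1 ≤ lim) →
      csLoop lines i lim c1 c2 (k - i - 1) (PySem.List.pyRange k (lines.length : Int) 1) =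
        (match occ c1 c2 k suf with
         | some j => if j = i + 1 ∨ j - i - 1 ≤ lim then some (j - i) else none
         | none => none) := by
  intro suf
  induction suf with
  | nil =>
    intro k hk0 hkn hdrop hik hcond
    have hlen : lines.length ≤ k.toNat := by
      by_contra h
      rw [Nat.not_le] at h
      have : lines.drop k.toNat ≠ [] := by
        apply List.ne_nil_of_length_pos
        simp [List.length_drop]; omega
      exact this hdrop.symm
    have : ((lines.length : Int)) ≤ k := by omega
    rw [PySem.List.pyRange_one_eq_nil this]
    simp [csLoop, occ]
  | cons l ls ih =>
    intro k hk0 hkn hdrop hik hcond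
    have hklt : k.toNat < lines.length := by
      by_contra h
      rw [Nat.not_lt] at h
      have : lines.drop k.toNat = [] := List.drop_eq_nil_of_le h
      rw [this] at hdrop; exact (List.cons_ne_nil l ls) hdrop
    have hkltI : k < (lines.length : Int) := by omega
    rw [PySem.List.pyRange_one_cons hkltI]
    simp only [csLoop]
    have hskip : ¬ (k ≤ i) := by omega
    rw [if_neg hskip]
    have hget : (PySem.List.pyGet? lines k).getD [] = l := by
      rw [PySem.List.pyGet?_of_nonneg lines hk0]
      have h0 : (lines.drop k.toNat)[0]? = some l := by rw [← hdrop]; rfl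
      rw [List.getElem?_drop] at h0
      simp only [Nat.add_zero] at h0
      rw [h0]
      rfl
    rw [hget]
    by_cases hhit : ((PySem.List.slice l (some 2) none).contains c1 || (PySem.List.slice l (some 2) none).contains c2) = true
    · rw [if_pos hhit]
      simp only [occ]
      rw [if_pos hhit]
      exact (if_pos hcond).symm
    · rw [if_neg hhit]
      simp only [occ]
      rw [if_neg hhit]
      have hdrop' : ls = lines.drop (k + 1).toNat := by
        have h1 : (k + 1).toNat = k.toNat + 1 := by omega
        rw [h1, ← List.drop_drop]
        rw [← hdrop]
        simp
      by_cases hbrk : k - i - 1 + 1 > lim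
      · rw [if_pos hbrk]
        cases ho : occ c1 c2 (k + 1) ls with
        | none => simp
        | some j =>
          have hge := occ_ge c1 c2 ls (k + 1) j ho
          have hne : ¬ (j = i + 1 ∨ j - i - 1 ≤ lim) := by omega
          exact (if_neg hne).symm
      · rw [if_neg hbrk]
        have hrec := ih (k + 1) (by omega) (by omega) hdrop' (by omega) (by omega)
        have harg : k - i - 1 + 1 = (k + 1) - i - 1 := by omega
        rw [harg]
        exact hrec

theorem checkCmdSep_eq_map (lines : List (List Int)) (lim : Int) :
    (PySem.List.pyRange 0 (lines.length : Int) 1).map (fun i =>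
      let cline := (PySem.List.pyGet? lines i).getD []
      let c1 := (PySem.List.pyGet? cline 0).getD 0
      let c2 := (PySem.List.pyGet? cline 1).getD 0
      match csLoop lines i lim c1 c2 0 (PySem.List.pyRange i (lines.length : Int) 1) with
      | some v => v
      | none => (lines.length : Int))
    = (PySem.List.pyRange 0 (lines.length : Int) 1).map (specAt lines lim) := by
  apply List.map_congr_left
  intro i hi
  rw [PySem.List.mem_pyRange_one] at hi
  obtain ⟨hi0, hin⟩ := hi
  simp only
  rw [PySem.List.pyRange_one_cons hin]
  simp only [csLoop, le_refl, if_pos]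
  have h := csLoop_eq lines i lim
    ((PySem.List.pyGet? ((PySem.List.pyGet? lines i).getD []) 0).getD 0)
    ((PySem.List.pyGet? ((PySem.List.pyGet? lines i).getD []) 1).getD 0)
    (lines.drop (i + 1).toNat) (i + 1) (by omega) (by omega) rfl (by omega) (Or.inl rfl)
  rw [show (i + 1) - i - 1 = (0 : Int) from by ring] at h
  rw [h]
  simp only [specAt]
  cases occ ((PySem.List.pyGet? ((PySem.List.pyGet? lines i).getD []) 0).getD 0)
        ((PySem.List.pyGet? ((PySem.List.pyGet? lines i).getD []) 1).getD 0)
        (i + 1) (lines.drop (i + 1).toNat) with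
  | none => simp
  | some j =>
    by_cases hc : j = i + 1 ∨ j - i - 1 ≤ lim
    · simp only [if_pos hc]
    · simp only [if_neg hc]

-- dict lookup after the foldl of inserts in B's update step
theorem get?_foldl_insert (vs : List Int) : ∀ (d : PySem.Dict Int Int) (i v : Int),
    (vs.foldl (fun d x => d.insert x i) d).get? v = if v ∈ vs then some i else d.get? v := by
  induction vs with
  | nil => intro d i v; simp
  | cons x vs ih =>
    intro d i v
    simp only [List.foldl_cons]
    rw [ih]
    by_cases hv : v ∈ vs
    · simp [hv]
    · by_cases hx : v = x
      · subst hx; simp [hv, PySem.Dict.get?_insert_self]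
      · simp [hv, PySem.Dict.get?_insert, hx]

-- reference form of B's output
def refOut (w n : Int) : Int → List (List Int) → List Int
  | _, [] => []
  | i, cline :: rest =>
    let c1 := (PySem.List.pyGet? cline 0).getD 0
    let c2 := (PySem.List.pyGet? cline 1).getD 0
    (match occ c1 c2 (i + 1) rest with
     | some j => if j - i - 1 ≤ w then j - i else n
     | none => n) :: refOut w n (i + 1) rest

theorem altGo_spec (w n : Int) : ∀ (suf : List (List Int)) (i : Int),
    (∀ v, ((altGo w n i suf).1).get? v = occ1 v i suf) ∧
    (altGo w n i suf).2 = refOut w n i suf := by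
  intro suf
  induction suf with
  | nil => intro i; constructor <;> simp [altGo, refOut, occ1]
  | cons cline rest ih =>
    intro i
    obtain ⟨ihd, iho⟩ := ih (i + 1)
    constructor
    · intro v
      simp only [altGo]
      rw [get?_foldl_insert]
      simp only [occ1]
      by_cases hv : v ∈ PySem.List.slice cline (some 2) none
      · simp [hv]
      · simp [hv, ihd v]
    · simp only [altGo, refOut]
      rw [iho, ihd, ihd, occ_eq_min]

theorem refOut_eq_map (lines : List (List Int)) (lim : Int) :
    ∀ (suf : List (List Int)) (i : Int), 0 ≤ i → suf = lines.drop i.toNat →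
      refOut (if lim > 0 then lim else 0) (lines.length : Int) i suf
        = (PySem.List.pyRange i (lines.length : Int) 1).map (specAt lines lim) := by
  intro suf
  induction suf with
  | nil =>
    intro i hi0 hdrop
    have hlen : lines.length ≤ i.toNat := by
      by_contra h
      rw [Nat.not_le] at h
      have : lines.drop i.toNat ≠ [] := by
        apply List.ne_nil_of_length_pos
        simp [List.length_drop]; omega
      exact this hdrop.symm
    rw [PySem.List.pyRange_one_eq_nil (by omega)]
    simp [refOut]
  | cons cline rest ih =>
    intro i hi0 hdrop
    have hilt : i.toNat < lines.length := by
      by_contra h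
      rw [Nat.not_lt] at h
      have : lines.drop i.toNat = [] := List.drop_eq_nil_of_le h
      rw [this] at hdrop; exact (List.cons_ne_nil cline rest) hdrop
    have hiltI : i < (lines.length : Int) := by omega
    rw [PySem.List.pyRange_one_cons hiltI]
    have hdrop' : rest = lines.drop (i + 1).toNat := by
      have h1 : (i + 1).toNat = i.toNat + 1 := by omega
      rw [h1, ← List.drop_drop, ← hdrop]
      simp
    simp only [refOut, List.map_cons]
    rw [ih (i + 1) (by omega) hdrop']
    congr 1
    have hget : (PySem.List.pyGet? lines i).getD [] = cline := by
      rw [PySem.List.pyGet?_of_nonneg lines hi0]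
      have h0 : (lines.drop i.toNat)[0]? = some cline := by rw [← hdrop]; rfl
      rw [List.getElem?_drop] at h0
      simp only [Nat.add_zero] at h0
      rw [h0]
      rfl
    simp only [specAt, hget, ← hdrop']
    cases ho : occ ((PySem.List.pyGet? cline 0).getD 0) ((PySem.List.pyGet? cline 1).getD 0) (i + 1) rest with
    | none => simp
    | some j =>
      have hge := occ_ge _ _ rest (i + 1) j ho
      by_cases hlim : lim > 0
      · simp only [if_pos hlim]
        by_cases hc : j - i - 1 ≤ lim
        · rw [if_pos hc, if_pos (Or.inr hc)]
        · rw [if_neg hc, if_neg (by omega)]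
      · simp only [if_neg hlim]
        by_cases hc : j - i - 1 ≤ 0
        · rw [if_pos hc, if_pos (by omega)]
        · rw [if_neg hc, if_neg (by omega)]

-- ===== VERDICT (by name: the statement is the Claim_ definition above) =====
theorem checkCmdSep_spec : Claim_equal_checkCmdSep := by
  intro lines limit _ _
  unfold Spec_checkCmdSep checkCmdSep checkCmdSep_alt
  cases limit with
  | none =>
    simp only
    rw [(altGo_spec (if ((lines.length : Int) + 1) > 0 then (lines.length : Int) + 1 else 0)
          (lines.length : Int) lines 0).2]
    rw [refOut_eq_map lines ((lines.length : Int) + 1) lines 0 le_rfl (by simp)]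
    exact checkCmdSep_eq_map lines ((lines.length : Int) + 1)
  | some l =>
    simp only
    rw [(altGo_spec (if l > 0 then l else 0) (lines.length : Int) lines 0).2]
    rw [refOut_eq_map lines l lines 0 le_rfl (by simp)]
    exact checkCmdSep_eq_map lines l
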